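-- pv_equiv track=rewrite | github.com/thienph3/olympic-informatics-vietnam | month1/problem070401.py | remove_duplicates_count
-- ===== SOURCE A (Python) =====
-- def remove_duplicates_count(arr):
--     """Loại bỏ trùng lặp và đếm số lần xuất hiện"""
--     unique_items = []
--     counts = []
--
--     for item in arr:
--         if item in unique_items:
--             index = unique_items.index(item)
--             counts[index] += 1
--         else:
--             unique_items.append(item)
--             counts.append(1)
--
--     return unique_items, counts
-- ===== SOURCE B (Python) =====
-- def remove_duplicates_count(arr):
--     """Loại bỏ trùng lặp và đếm số lần xuất hiện"""
--     unique_items = []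
--     for item in arr:
--         if item not in unique_items:
--             unique_items.append(item)
--     counts = [arr.count(x) for x in unique_items]
--     return unique_items, counts
-- ===== Notes on version B (the rewrite author's own statement) =====
-- stated objective: simpler
-- what changed: Replaces A's single pass that maintains parallel unique/counts lists with index bookkeeping by two independent passes: a plain dedup loop, then counts computed directly as [arr.count(x) for x in unique].
import Mathlib
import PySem

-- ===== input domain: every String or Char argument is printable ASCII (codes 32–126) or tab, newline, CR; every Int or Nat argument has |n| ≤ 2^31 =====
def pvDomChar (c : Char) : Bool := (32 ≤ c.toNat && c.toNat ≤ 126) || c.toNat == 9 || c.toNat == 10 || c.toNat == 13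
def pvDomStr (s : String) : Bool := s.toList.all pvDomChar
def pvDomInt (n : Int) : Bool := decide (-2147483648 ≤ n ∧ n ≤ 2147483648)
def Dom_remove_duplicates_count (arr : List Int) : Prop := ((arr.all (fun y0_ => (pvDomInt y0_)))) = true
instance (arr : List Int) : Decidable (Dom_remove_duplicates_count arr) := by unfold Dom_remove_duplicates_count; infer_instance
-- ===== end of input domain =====

-- B replaces A's single pass with index bookkeeping by two independent passes: a dedup loop,
-- then counts = [arr.count(x) for x in unique] (objective: simpler).

-- ===== PORT A =====
-- one loop iteration of A: state is (unique_items, counts)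
def pvStepA (st : List Int × List Int) (item : Int) : List Int × List Int :=
  if st.1.contains item then
    -- unique_items.index(item): succeeds since 'item in unique_items' just held, so 'none' is unreachable
    match PySem.List.index? st.1 item with
    | some index => (st.1, st.2.set index (st.2.getD index 0 + 1))
    | none => (st.1, st.2)
  else (st.1 ++ [item], st.2 ++ [1])

def remove_duplicates_count (arr : List Int) : List Int × List Int :=
  arr.foldl pvStepA ([], [])

-- ===== PORT B =====
def remove_duplicates_count_alt (arr : List Int) : List Int × List Int :=
  let unique := arr.foldl (fun u item => if u.contains item then u else u ++ [item]) []
  (unique, unique.map (fun x => (PySem.List.count arr x : Int)))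

-- ===== PRECONDITION & SPEC =====
def Spec_remove_duplicates_count (arr : List Int) (out : List Int × List Int) : Prop := out = remove_duplicates_count_alt arr
instance (arr : List Int) (out : List Int × List Int) : Decidable (Spec_remove_duplicates_count arr out) := by unfold Spec_remove_duplicates_count; infer_instance

-- ===== CLAIM (what is proved, stated in full; the proofs are below) =====
def Claim_equal_remove_duplicates_count : Prop := ∀ (arr : List Int), Dom_remove_duplicates_count arr → Spec_remove_duplicates_count arr (remove_duplicates_count arr)

-- ===== LEMMAS AND PROOFS =====

-- B's dedup loop is exactly PySem.Set.ofList
lemma ofList_append_singleton (l : List Int) (x : Int) :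
    PySem.Set.ofList (l ++ [x]) =
      if (PySem.Set.ofList l).contains x then PySem.Set.ofList l else PySem.Set.ofList l ++ [x] := by
  simp [PySem.Set.ofList, List.foldl_append, PySem.Set.add]

-- the counts list maintained by A over a processed prefix 'seen'
def pvCnts (seen : List Int) : List Int :=
  (PySem.Set.ofList seen).map (fun x => (PySem.List.count seen x : Int))

-- one loop step of A preserves the invariant
lemma stepA_key (seen : List Int) (x : Int) :
    pvStepA (PySem.Set.ofList seen, pvCnts seen) x = (PySem.Set.ofList (seen ++ [x]), pvCnts (seen ++ [x])) := by
  by_cases hmem : x ∈ PySem.Set.ofList seen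
  · -- duplicate branch
    have hxseen : x ∈ seen := by simpa using hmem
    obtain ⟨k, hk⟩ : ∃ k, PySem.List.index? (PySem.Set.ofList seen) x = some k := by
      have := (PySem.List.index?_isSome_iff (xs := PySem.Set.ofList seen) (v := x)).mpr hmem
      exact Option.isSome_iff_exists.mp this
    obtain ⟨hklt, hkx, hbefore⟩ := PySem.List.getElem_of_index?_eq_some hk
    have hcont : (PySem.Set.ofList seen).contains x = true := by simpa using hxseen
    have hset : PySem.Set.ofList (seen ++ [x]) = PySem.Set.ofList seen := by
      rw [ofList_append_singleton, if_pos hcont]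
    have hnd : (PySem.Set.ofList seen).Nodup := PySem.Set.nodup_ofList seen
    have hk' : List.idxOf? x (PySem.Set.ofList seen) = some k := by simpa using hk
    have hred : pvStepA (PySem.Set.ofList seen, pvCnts seen) x
        = (PySem.Set.ofList seen, (pvCnts seen).set k ((pvCnts seen).getD k 0 + 1)) := by
      simp [pvStepA, hxseen, hk']
    rw [hred, hset]
    refine Prod.ext rfl ?_
    apply List.ext_getElem
    · simp [pvCnts, hset]
    · intro j h1 h2
      have hjlen : j < (PySem.Set.ofList seen).length := by
        have := h2; simp [pvCnts, hset] at this; exact this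
      rw [List.getElem_set]
      have hgetD : (pvCnts seen).getD k 0 = (PySem.List.count seen x : Int) := by
        simp only [pvCnts, List.getD, List.getElem?_map]
        rw [List.getElem?_eq_getElem hklt]
        simp [hkx]
      by_cases hkj : k = j
      · subst hkj
        rw [if_pos rfl, hgetD]
        simp [pvCnts, hset, hkx]
      · have hjx : (PySem.Set.ofList seen)[j] ≠ x := by
          intro h
          exact hkj ((hnd.getElem_inj_iff).mp (by rw [h, hkx])).symm
        have hne : (PySem.Set.ofList seen)[j] ∉ ([x] : List Int) := by simp [hjx]
        simp [pvCnts, hset, PySem.List.count, List.count_append,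
          List.count_eq_zero_of_not_mem hne, hkj]
  · -- new element branch
    have hnotin : x ∉ seen := fun h => hmem (by simpa using h)
    have hset : PySem.Set.ofList (seen ++ [x]) = PySem.Set.ofList seen ++ [x] := by
      rw [ofList_append_singleton, if_neg (by simpa using hnotin)]
    have hred : pvStepA (PySem.Set.ofList seen, pvCnts seen) x
        = (PySem.Set.ofList seen ++ [x], pvCnts seen ++ [1]) := by
      simp [pvStepA, hnotin]
    rw [hred, hset]
    refine Prod.ext rfl ?_
    simp only [pvCnts, hset, List.map_append, List.map_cons, List.map_nil]
    congr 1
    · apply List.map_congr_left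
      intro a ha
      have ha' : a ∈ seen := by simpa using ha
      have hax : a ≠ x := fun h => hnotin (h ▸ ha')
      simp [PySem.List.count, List.count_append,
        List.count_eq_zero_of_not_mem (show a ∉ [x] by simp [hax])]
    · simp [PySem.List.count, List.count_eq_zero_of_not_mem hnotin]

lemma loop_invariant (rest seen : List Int) :
    rest.foldl pvStepA (PySem.Set.ofList seen, pvCnts seen)
      = (PySem.Set.ofList (seen ++ rest), pvCnts (seen ++ rest)) := by
  induction rest generalizing seen with
  | nil => simp
  | cons x rest ih =>
    rw [List.foldl_cons, stepA_key, ih (seen ++ [x])]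
    simp

-- ===== VERDICT (by name: the statement is the Claim_ definition above) =====
theorem remove_duplicates_count_spec : Claim_equal_remove_duplicates_count := by
  intro arr _
  unfold Spec_remove_duplicates_count remove_duplicates_count remove_duplicates_count_alt
  have h := loop_invariant arr []
  simp only [List.nil_append] at h
  rw [show (([], []) : List Int × List Int) = (PySem.Set.ofList ([] : List Int), pvCnts []) from rfl, h]
  rfl
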